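-- pv_equiv track=rewrite | github.com/konakona08/my-formats | Image/FWI/FWI1E.py | FWI1_bitdown
-- ===== SOURCE A (Python) =====
-- def FWI1_bitdown(n):
--     bitout = 0
--     stored_val = 0
--
--     while (bitout <= 16):
--         bitout+=1
--         if (n < ((((1 << bitout) - 1)) << 2)):
--             bitout-=1
--             break
--     stored_val = n - (((1 << bitout) - 1) << 2);
--     return bitout, stored_val
-- ===== SOURCE B (Python) =====
-- def FWI1_bitdown(n):
--     if n < 4:
--         bitout = 0
--     else:
--         bitout = min((n // 4 + 1).bit_length() - 1, 17)
--     stored_val = n - (((1 << bitout) - 1) << 2)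
--     return bitout, stored_val
-- ===== Notes on version B (the rewrite author's own statement) =====
-- stated objective: simpler
-- what changed: Replaced A's up-to-17-iteration threshold-scanning while-loop by a closed-form computation of the bit index via (n//4 + 1).bit_length() - 1 clamped to 17 (0 for n < 4); the residual formula is unchanged.
import Mathlib
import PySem

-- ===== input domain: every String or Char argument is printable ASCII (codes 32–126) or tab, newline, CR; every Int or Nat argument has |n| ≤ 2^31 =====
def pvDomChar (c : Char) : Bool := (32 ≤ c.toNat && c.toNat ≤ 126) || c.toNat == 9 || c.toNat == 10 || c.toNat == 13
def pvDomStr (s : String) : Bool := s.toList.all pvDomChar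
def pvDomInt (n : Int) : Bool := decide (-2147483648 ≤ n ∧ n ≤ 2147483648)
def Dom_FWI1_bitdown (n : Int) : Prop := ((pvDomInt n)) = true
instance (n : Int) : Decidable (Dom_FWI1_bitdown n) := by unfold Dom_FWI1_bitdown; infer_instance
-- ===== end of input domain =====

-- B replaces A's up-to-17-step threshold-scanning loop by closed-form bit-length
-- arithmetic (simpler); the residual formula is kept verbatim.

-- ===== PORT A =====
-- A's while-loop: bitout only ever holds 0..17, so it is kept as a Nat counter
-- with an explicit fuel of 18 (the loop runs at most 18 guard checks);
-- Python's 1 << b and x << 2 on these non-negative values are 2^b and x*4.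
def FWI1_bitdown.loopA (n : Int) (bitout : Nat) : Nat → Nat
  | 0 => bitout
  | fuel + 1 =>
    if bitout ≤ 16 then
      -- bitout += 1
      let b := bitout + 1
      -- if n < ((1 << bitout) - 1) << 2: bitout -= 1; break
      if n < ((2 ^ b : Int) - 1) * 4 then b - 1
      else FWI1_bitdown.loopA n b fuel
    else bitout

def FWI1_bitdown (n : Int) : Int × Int :=
  let bitout := FWI1_bitdown.loopA n 0 18
  ((bitout : Int), n - ((2 ^ bitout : Int) - 1) * 4)

-- ===== PORT B =====
-- (n // 4 + 1).bit_length() → PySem.Int.bitLength (exact: same value as Python's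
-- int.bit_length); min(· - 1, 17) over Nat (the argument is ≥ 2 when n ≥ 4).
def FWI1_bitdown_alt (n : Int) : Int × Int :=
  let bitout : Nat :=
    if n < 4 then 0
    else min (PySem.Int.bitLength (PySem.Int.floordiv n 4 + 1) - 1) 17
  ((bitout : Int), n - ((2 ^ bitout : Int) - 1) * 4)

-- ===== PRECONDITION & SPEC =====
def Spec_FWI1_bitdown (n : Int) (out : Int × Int) : Prop := out = FWI1_bitdown_alt n
instance (n : Int) (out : Int × Int) : Decidable (Spec_FWI1_bitdown n out) := by unfold Spec_FWI1_bitdown; infer_instance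

-- ===== CLAIM (what is proved, stated in full; the proofs are below) =====
def Claim_equal_FWI1_bitdown : Prop := ∀ (n : Int), Dom_FWI1_bitdown n → Spec_FWI1_bitdown n (FWI1_bitdown n)

-- ===== LEMMAS AND PROOFS =====

-- B's bitout, named for the proofs.
def bitoutB (n : Int) : Nat :=
  if n < 4 then 0
  else min (PySem.Int.bitLength (PySem.Int.floordiv n 4 + 1) - 1) 17

-- Characterisation of bit_length: for m ≥ 1, 2^k ≤ m ↔ k ≤ bitLength m - 1.
lemma pow_le_iff_le_bitlen (m : Int) (hm : 1 ≤ m) (k : Nat) :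
    ((2 ^ k : Int) ≤ m ↔ k ≤ PySem.Int.bitLength m - 1) := by
  have hM : ((m.natAbs : Int)) = m := Int.natAbs_of_nonneg (by omega)
  have hcast : ((2 : Int) ^ k ≤ m) ↔ (2 ^ k ≤ m.natAbs) := by
    rw [← hM]; exact_mod_cast Iff.rfl
  rw [hcast]
  have h1 : m.natAbs < 2 ^ PySem.Int.bitLength m := PySem.Int.lt_two_pow_bitLength m
  have h2 : 2 ^ (PySem.Int.bitLength m - 1) ≤ m.natAbs :=
    PySem.Int.two_pow_bitLength_le m (by omega)
  constructor
  · intro h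
    by_contra hk
    push Not at hk
    have hLk : PySem.Int.bitLength m ≤ k := by omega
    have := Nat.pow_le_pow_right (by norm_num : 1 ≤ 2) hLk
    omega
  · intro hk
    have := Nat.pow_le_pow_right (by norm_num : 1 ≤ 2) hk
    omega

-- threshold bracket: (2^k - 1)*4 ≤ n ↔ 2^k ≤ n//4 + 1
lemma thr_iff (n : Int) (k : Nat) :
    (((2 ^ k : Int) - 1) * 4 ≤ n ↔ (2 ^ k : Int) ≤ PySem.Int.floordiv n 4 + 1) := by
  have h : ((2 ^ k : Int) - 1 ≤ PySem.Int.floordiv n 4) ↔ ((2 ^ k : Int) - 1) * 4 ≤ n :=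
    PySem.Int.le_floordiv_iff_mul_le (by norm_num)
  constructor
  · intro g; linarith [h.mpr g]
  · intro g; linarith [h.mp (by linarith)]

lemma fd_succ_ge_two (n : Int) (h4 : ¬ n < 4) : 1 ≤ PySem.Int.floordiv n 4 + 1 := by
  have := (PySem.Int.le_floordiv_iff_mul_le (a := n) (b := 4) (q := 1) (by norm_num)).mpr (by omega)
  omega

-- bitoutB facts
lemma bitoutB_le (n : Int) : bitoutB n ≤ 17 := by
  unfold bitoutB; split <;> omega

-- loop invariant: starting at any b ≤ bitoutB n with enough fuel, the loop lands on bitoutB n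
lemma loopA_eq_bitoutB (n : Int) : ∀ (fuel b : Nat), 18 ≤ b + fuel → b ≤ bitoutB n →
    FWI1_bitdown.loopA n b fuel = bitoutB n := by
  intro fuel
  induction fuel with
  | zero => intro b hf hb; have := bitoutB_le n; omega
  | succ f ih =>
    intro b hf hb
    unfold FWI1_bitdown.loopA
    by_cases hb16 : b ≤ 16
    · rw [if_pos hb16]
      by_cases hc : n < ((2 ^ (b + 1) : Int) - 1) * 4
      · rw [if_pos hc]
        -- the loop stops at b; show bitoutB n ≤ b
        by_cases h4 : n < 4
        · have : bitoutB n = 0 := by unfold bitoutB; rw [if_pos h4]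
          omega
        · have h' : ¬ ((2 ^ (b + 1) : Int) ≤ PySem.Int.floordiv n 4 + 1) := by
            intro h
            exact absurd ((thr_iff n (b + 1)).mpr h) (by omega)
          rw [pow_le_iff_le_bitlen _ (fd_succ_ge_two n h4)] at h'
          have : bitoutB n ≤ b := by
            unfold bitoutB; rw [if_neg h4]; omega
          omega
      · rw [if_neg hc]
        push Not at hc
        have h4 : ¬ n < 4 := by
          have h2 : (2 : Int) ≤ 2 ^ (b + 1) := by
            have : (2 : Int) ^ 1 ≤ 2 ^ (b + 1) := by
              apply pow_le_pow_right₀ (by norm_num); omega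
            simpa using this
          intro hlt
          linarith
        have hnext : b + 1 ≤ bitoutB n := by
          have h := (thr_iff n (b + 1)).mp hc
          rw [pow_le_iff_le_bitlen _ (fd_succ_ge_two n h4)] at h
          unfold bitoutB; rw [if_neg h4]; omega
        exact ih (b + 1) (by omega) hnext
    · rw [if_neg hb16]
      have := bitoutB_le n
      omega

-- ===== VERDICT (by name: the statement is the Claim_ definition above) =====
theorem FWI1_bitdown_spec : Claim_equal_FWI1_bitdown := by
  intro n _
  unfold Spec_FWI1_bitdown FWI1_bitdown FWI1_bitdown_alt
  have h := loopA_eq_bitoutB n 18 0 (by omega) (by omega)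
  simp only [h]
  rfl
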